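-- pv_equiv track=rewrite | github.com/tsteindl/CCC23 | main_t.py | check_route
-- ===== SOURCE A (Python) =====
-- def check_route(map, route):
--     res = "VALID"
--     visited = []
--     for c in route:
--         for v in visited:
--             if v == c:
--                 return "INVALID"
--             # for d in get_diag(v):
--             #     if d in visited:
--             #         return "INVALID"
--             # if [c[0] + 1, c[1]] in visited and [c[0], c[1] + 1] in visited or [c[0] + 1, c[1] + 1] in visited and [c[0], c[1] - 1] in visited or [c[0] + 1, c[1]] in visited and [c[0], c[1] + 1] in visited
--
--         visited.append(c)
--     return res
-- ===== SOURCE B (Python) =====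
-- def check_route(map, route):
--     s = sorted(route)
--     for a, b in zip(s, s[1:]):
--         if a == b:
--             return "INVALID"
--     return "VALID"
-- ===== Notes on version B (the rewrite author's own statement) =====
-- stated objective: alternative
-- what changed: Replaces A's incremental visited-list with quadratic inner rescans by sorting the route once and scanning adjacent pairs of the sorted copy for equality.
import Mathlib
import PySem

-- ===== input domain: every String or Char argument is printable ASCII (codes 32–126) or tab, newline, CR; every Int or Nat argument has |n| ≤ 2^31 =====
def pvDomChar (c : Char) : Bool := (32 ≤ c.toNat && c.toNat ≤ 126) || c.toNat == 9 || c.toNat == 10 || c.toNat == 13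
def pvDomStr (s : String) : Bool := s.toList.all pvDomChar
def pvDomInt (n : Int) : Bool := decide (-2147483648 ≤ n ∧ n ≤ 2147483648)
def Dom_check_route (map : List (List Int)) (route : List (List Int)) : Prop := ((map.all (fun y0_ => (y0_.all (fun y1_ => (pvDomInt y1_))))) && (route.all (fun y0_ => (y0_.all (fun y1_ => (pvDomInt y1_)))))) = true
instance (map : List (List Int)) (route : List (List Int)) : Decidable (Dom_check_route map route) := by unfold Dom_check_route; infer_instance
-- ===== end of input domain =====

-- ===== PORT A =====
-- B sorts the route and scans adjacent pairs instead of A's visited-list with inner rescans; same result, alternative algorithm.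
-- A: visited-list loop; inner 'for v in visited: if v == c: return "INVALID"' is the containment scan.
def check_route_loop (visited : List (List Int)) : List (List Int) → String
  | [] => "VALID"
  | c :: rest =>
    if visited.any (fun v => v == c) then "INVALID"
    else check_route_loop (visited ++ [c]) rest

def check_route (map : List (List Int)) (route : List (List Int)) : String :=
  check_route_loop [] route

-- ===== PORT B =====
-- 'for a, b in zip(s, s[1:]): if a == b: return "INVALID"'
def check_route_adj : List (List Int) → String
  | a :: b :: rest => if a == b then "INVALID" else check_route_adj (b :: rest)
  | _ => "VALID"

def check_route_alt (map : List (List Int)) (route : List (List Int)) : String :=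
  check_route_adj (PySem.List.sorted route (fun x => x) false)

-- ===== PRECONDITION & SPEC =====
def Spec_check_route (map : List (List Int)) (route : List (List Int)) (out : String) : Prop := out = check_route_alt map route
instance (map : List (List Int)) (route : List (List Int)) (out : String) : Decidable (Spec_check_route map route out) := by unfold Spec_check_route; infer_instance

-- ===== CLAIM (what is proved, stated in full; the proofs are below) =====
def Claim_equal_check_route : Prop := ∀ (map : List (List Int)) (route : List (List Int)), Dom_check_route map route → Spec_check_route map route (check_route map route)

-- ===== LEMMAS AND PROOFS =====

-- A's loop returns VALID exactly when no element of rest occurs in visited or twice in rest.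
theorem check_route_loop_eq (rest : List (List Int)) :
    ∀ (visited : List (List Int)), visited.Nodup →
      check_route_loop visited rest = if (visited ++ rest).Nodup then "VALID" else "INVALID" := by
  induction rest with
  | nil => intro visited h; simp [check_route_loop, h]
  | cons c rest ih =>
    intro visited h
    by_cases hc : c ∈ visited
    · have : visited.any (fun v => v == c) = true := by
        simp only [List.any_eq_true]; exact ⟨c, hc, by simp⟩
      have hnd : ¬ (visited ++ c :: rest).Nodup := by
        intro hnd
        exact (List.disjoint_of_nodup_append hnd) hc (by simp)
      simp [check_route_loop, this, hnd]
    · have : visited.any (fun v => v == c) = false := by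
        simp only [List.any_eq_false]; intro v hv
        simp only [beq_iff_eq]; intro he; exact hc (he ▸ hv)
      have h2 : (visited ++ [c]).Nodup := by
        simp [List.nodup_append, h]
        intro a ha he; exact hc (he ▸ ha)
      rw [check_route_loop, this, if_neg (by simp), ih _ h2]
      simp only [List.append_assoc, List.singleton_append]

-- B's adjacent scan on a (· ≤ ·)-pairwise list returns VALID exactly on Nodup lists.
theorem check_route_adj_eq (s : List (List Int)) (hs : s.Pairwise (· ≤ ·)) :
    check_route_adj s = if s.Nodup then "VALID" else "INVALID" := by
  induction s with
  | nil => simp [check_route_adj]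
  | cons a t ih =>
    match t, hs with
    | [], _ => simp [check_route_adj]
    | b :: t, hs =>
      rw [List.pairwise_cons] at hs
      obtain ⟨hab, hrest⟩ := hs
      by_cases he : a = b
      · subst he
        have : ¬ (a :: a :: t).Nodup := by simp [List.nodup_cons]
        simp [check_route_adj, this]
      · have hlt : a < b := lt_of_le_of_ne (hab b (by simp)) he
        have hnotmem : a ∉ b :: t := by
          intro hm
          have : a ≤ a := le_refl a
          rcases List.mem_cons.mp hm with h | h
          · exact he h
          · have := (List.pairwise_cons.mp hrest).1 a h
            exact absurd (lt_of_lt_of_le hlt this) (lt_irrefl a)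
        rw [check_route_adj, if_neg (by simp [he]), ih hrest]
        simp [List.nodup_cons, hnotmem]

-- the two LT/DecidableLT instances on List Int are definitionally equal
theorem sorted_inst_eq (route : List (List Int)) :
    @PySem.List.sorted (List Int) (List Int) List.instLT (fun a b => a.decidableLT b) route (fun x => x) false
      = @PySem.List.sorted (List Int) (List Int) List.instLinearOrder.toLT LinearOrder.toDecidableLT route (fun x => x) false := by
  congr 1

-- ===== VERDICT (by name: the statement is the Claim_ definition above) =====
theorem check_route_spec : Claim_equal_check_route := by
  intro map route _
  unfold Spec_check_route check_route check_route_alt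
  rw [check_route_loop_eq route [] List.nodup_nil, sorted_inst_eq,
      check_route_adj_eq _ (PySem.List.sorted_pairwise route (fun x => x))]
  have hp : (@PySem.List.sorted (List Int) (List Int) List.instLinearOrder.toLT LinearOrder.toDecidableLT route (fun x => x) false).Nodup ↔ route.Nodup := by
    rw [← sorted_inst_eq]
    exact List.Perm.nodup_iff (PySem.List.sorted_perm route (fun x => x) false)
  rw [List.nil_append]
  exact (if_congr hp rfl rfl).symm
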